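-- pv_equiv track=rewrite | github.com/onyourYujin/AlgorithmProblemSolving | Dynamic Programming/prog2_long jump.py | solution
-- ===== SOURCE A (Python) =====
-- def solution(n):
--     if n < 3:
--         return n
--     stairs = [0 for _ in range(n+1)]
--     stairs[1] = 1
--     stairs[2] = 2
--     for i in range(3,n+1):
--         stairs[i] = stairs[i-1]+stairs[i-2]
--     return stairs[n] % 1234567
-- ===== SOURCE B (Python) =====
-- M = 1234567
--
-- def _fib(k):
--     # returns (F(k) % M, F(k+1) % M) by fast doubling, F(0)=0, F(1)=1
--     if k == 0:
--         return (0, 1)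
--     a, b = _fib(k // 2)
--     c = (a * ((2 * b - a) % M)) % M
--     d = (a * a + b * b) % M
--     if k % 2 == 0:
--         return (c, d)
--     return (d, (c + d) % M)
--
-- def solution(n):
--     if n < 3:
--         return n
--     return _fib(n + 1)[0]
-- ===== Notes on version B (the rewrite author's own statement) =====
-- stated objective: faster
-- what changed: Replaces the O(n) DP table of the Fibonacci-like staircase count with O(log n) fast-doubling of the Fibonacci recurrence under mod 1234567.
import Mathlib
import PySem

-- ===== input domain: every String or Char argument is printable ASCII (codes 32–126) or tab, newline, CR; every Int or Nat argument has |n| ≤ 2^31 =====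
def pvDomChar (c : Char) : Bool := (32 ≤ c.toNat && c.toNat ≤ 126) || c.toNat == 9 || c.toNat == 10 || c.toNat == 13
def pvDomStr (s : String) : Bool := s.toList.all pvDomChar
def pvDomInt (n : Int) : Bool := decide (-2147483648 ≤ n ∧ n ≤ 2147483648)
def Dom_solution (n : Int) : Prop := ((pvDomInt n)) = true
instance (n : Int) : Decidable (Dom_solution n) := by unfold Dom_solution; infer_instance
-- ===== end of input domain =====

-- B replaces A's O(n) DP-table recurrence with fast-doubling of the Fibonacci recurrence mod 1234567.

-- ===== PORT A =====
def solution (n : Int) : Int :=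
  if n < 3 then n
  else
    let stairs := (PySem.List.pyRange 0 (n + 1) 1).map (fun _ => (0 : Int))
    let stairs := PySem.List.pySetD stairs 1 1
    let stairs := PySem.List.pySetD stairs 2 2
    let stairs := (PySem.List.pyRange 3 (n + 1) 1).foldl
      (fun st i =>
        PySem.List.pySetD st i (PySem.List.pyGetD st (i - 1) 0 + PySem.List.pyGetD st (i - 2) 0))
      stairs
    PySem.Int.mod (PySem.List.pyGetD stairs n 0) 1234567

-- ===== PORT B =====
-- _fib in Source B: fast doubling, returns (F(k) % 1234567, F(k+1) % 1234567)
def fibPair : Nat → Int × Int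
  | 0 => (0, 1)
  | (k + 1) =>
    let p := fibPair ((k + 1) / 2)
    let a := p.1
    let b := p.2
    let c := PySem.Int.mod (a * (PySem.Int.mod (2 * b - a) 1234567)) 1234567
    let d := PySem.Int.mod (a * a + b * b) 1234567
    if (k + 1) % 2 == 0 then (c, d) else (d, PySem.Int.mod (c + d) 1234567)
decreasing_by exact Nat.div_lt_self (Nat.succ_pos k) (by omega)

def solution_alt (n : Int) : Int :=
  if n < 3 then n
  else (fibPair (n + 1).toNat).1

-- ===== PRECONDITION & SPEC =====
def Spec_solution (n : Int) (out : Int) : Prop := out = solution_alt n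
instance (n : Int) (out : Int) : Decidable (Spec_solution n out) := by unfold Spec_solution; infer_instance

-- ===== CLAIM (what is proved, stated in full; the proofs are below) =====
def Claim_equal_solution : Prop := ∀ (n : Int), Dom_solution n → Spec_solution n (solution n)

-- ===== LEMMAS AND PROOFS =====

-- fast doubling computes Fibonacci mod 1234567
theorem fibPair_eq (k : Nat) :
    fibPair k = (((Nat.fib k : Int)) % 1234567, ((Nat.fib (k + 1) : Int)) % 1234567) := by
  induction k using Nat.strong_induction_on with
  | _ k ih =>
  match k with
  | 0 => simp [fibPair]
  | (k + 1) =>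
    have hlt : (k + 1) / 2 < k + 1 := Nat.div_lt_self (Nat.succ_pos k) (by omega)
    rw [fibPair, ih _ hlt]
    set m := (k + 1) / 2 with hm
    have hmod : ∀ x : Int, PySem.Int.mod x 1234567 = x % 1234567 := fun x =>
      PySem.Int.mod_eq_emod_of_pos (by norm_num)
    simp only [hmod]
    set A : Int := (Nat.fib m : Int) with hA
    set B : Int := (Nat.fib (m+1) : Int) with hB
    have em : ∀ x : Int, x % 1234567 ≡ x [ZMOD 1234567] := fun x => Int.emod_emod_of_dvd x dvd_rfl
    have hc : (A % 1234567) * ((2 * (B % 1234567) - A) % 1234567) % 1234567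
        = (Nat.fib (2*m) : Int) % 1234567 := by
      have h2m : (Nat.fib (2*m) : Int) = A * (2 * B - A) := by
        have hle : Nat.fib m ≤ 2 * Nat.fib (m+1) := le_trans Nat.fib_le_fib_succ (by omega)
        rw [Nat.fib_two_mul, Nat.cast_mul, Nat.cast_sub hle]; push_cast; ring
      rw [h2m]
      exact (em A).mul ((em _).trans (((Int.ModEq.refl 2).mul (em B)).sub (Int.ModEq.refl A)))
    have hd : ((A % 1234567) * (A % 1234567) + (B % 1234567) * (B % 1234567)) % 1234567
        = (Nat.fib (2*m+1) : Int) % 1234567 := by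
      have h2m1 : (Nat.fib (2*m+1) : Int) = A * A + B * B := by
        rw [Nat.fib_two_mul_add_one]; push_cast; ring
      rw [h2m1]
      exact ((em A).mul (em A)).add ((em B).mul (em B))
    rcases Nat.even_or_odd (k+1) with ⟨t, ht⟩ | ⟨t, ht⟩
    · have hmt : 2 * m = k + 1 := by omega
      have hpar : (k+1) % 2 = 0 := by omega
      simp only [hpar]
      simp only [← hmt]
      simp [hc, hd]
    · have hmt : 2 * m + 1 = k + 1 := by omega
      have hpar : (k+1) % 2 = 1 := by omega
      simp only [hpar]
      norm_num [Prod.mk.injEq]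
      refine ⟨?_, ?_⟩
      · rw [show k + 1 = 2*m + 1 by omega]; exact hd
      · have hf : (Nat.fib (2*m+2) : Int) = (Nat.fib (2*m) : Int) + (Nat.fib (2*m+1) : Int) := by
          rw [Nat.fib_add_two]; push_cast; ring
        rw [show k + 1 + 1 = 2*m + 2 by omega, hf]
        have hcm : Int.ModEq 1234567 (A % 1234567 * ((2 * (B % 1234567) - A) % 1234567))
            ((Nat.fib (2*m) : Int)) := hc
        have hdm : Int.ModEq 1234567 (A % 1234567 * (A % 1234567) + B % 1234567 * (B % 1234567))
            ((Nat.fib (2*m+1) : Int)) := hd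
        exact hcm.add hdm

-- A's DP loop invariant: after processing range(3, j+3), entries j+1 and j+2 hold fib(j+2), fib(j+3)
theorem loop_inv (N : Nat) (s0 : List Int) (hlen : s0.length = N + 1)
    (h1 : PySem.List.pyGetD s0 1 0 = (Nat.fib 2 : Int))
    (h2 : PySem.List.pyGetD s0 2 0 = (Nat.fib 3 : Int))
    (j : Nat) (hj : j + 2 ≤ N) :
    ((PySem.List.pyRange 3 ((j:Int)+3) 1).foldl
      (fun st i =>
        PySem.List.pySetD st i (PySem.List.pyGetD st (i - 1) 0 + PySem.List.pyGetD st (i - 2) 0))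
      s0).length = N + 1 ∧
    PySem.List.pyGetD ((PySem.List.pyRange 3 ((j:Int)+3) 1).foldl
      (fun st i =>
        PySem.List.pySetD st i (PySem.List.pyGetD st (i - 1) 0 + PySem.List.pyGetD st (i - 2) 0))
      s0) ((j:Int)+1) 0 = (Nat.fib (j+2) : Int) ∧
    PySem.List.pyGetD ((PySem.List.pyRange 3 ((j:Int)+3) 1).foldl
      (fun st i =>
        PySem.List.pySetD st i (PySem.List.pyGetD st (i - 1) 0 + PySem.List.pyGetD st (i - 2) 0))
      s0) ((j:Int)+2) 0 = (Nat.fib (j+3) : Int) := by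
  induction j with
  | zero =>
    rw [show ((0:Nat):Int)+3 = 3 by norm_num, PySem.List.pyRange_one_eq_nil (le_refl 3)]
    simpa using ⟨hlen, h1, h2⟩
  | succ j ih =>
    obtain ⟨ihl, ih1, ih2⟩ := ih (by omega)
    rw [show ((j+1:Nat):Int)+3 = ((j:Int)+3)+1 by push_cast; ring,
        PySem.List.pyRange_one_succ_right (by omega), List.foldl_append]
    set L := ((PySem.List.pyRange 3 ((j:Int)+3) 1).foldl
      (fun st i =>
        PySem.List.pySetD st i (PySem.List.pyGetD st (i - 1) 0 + PySem.List.pyGetD st (i - 2) 0))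
      s0) with hL
    simp only [List.foldl_cons, List.foldl_nil]
    rw [show (j:Int)+3-1 = (j:Int)+2 by ring, show (j:Int)+3-2 = (j:Int)+1 by ring, ih1, ih2]
    rw [show (j:Int)+3 = ((j+3:Nat):Int) by push_cast; ring,
        PySem.List.pySetD_natCast]
    have hlt : j + 3 < L.length := by omega
    refine ⟨by simpa using ihl, ?_, ?_⟩
    · rw [show ((j+1:Nat):Int)+1 = ((j+2:Nat):Int) by push_cast; ring, PySem.List.pyGetD_natCast,
          List.getD_eq_getElem?_getD, List.getElem?_set_ne (by omega), ← List.getD_eq_getElem?_getD,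
          ← PySem.List.pyGetD_natCast]
      rw [show ((j+2:Nat):Int) = (j:Int)+2 by push_cast; ring]
      exact ih2
    · rw [show ((j+1:Nat):Int)+2 = ((j+3:Nat):Int) by push_cast; ring, PySem.List.pyGetD_natCast,
          List.getD_eq_getElem?_getD, List.getElem?_set_self hlt]
      have : (Nat.fib (j+1+3) : Int) = (Nat.fib (j+2) : Int) + (Nat.fib (j+3) : Int) := by
        rw [show j+1+3 = (j+2)+2 by ring, Nat.fib_add_two]; push_cast; ring
      simp [this]; ring

theorem solution_eq_fib (n : Int) (h : ¬ n < 3) :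
    solution n = ((Nat.fib (n + 1).toNat : Int)) % 1234567 := by
  have hn3 : 3 ≤ n := by omega
  set N : Nat := n.toNat with hN
  have hn : (N : Int) = n := Int.toNat_of_nonneg (by omega)
  have hN3 : 3 ≤ N := by omega
  have hzl : ((PySem.List.pyRange 0 (n + 1) 1).map (fun _ => (0 : Int))).length = N + 1 := by
    simp [PySem.List.length_pyRange_one]; omega
  set zeros := (PySem.List.pyRange 0 (n + 1) 1).map (fun _ => (0 : Int)) with hz
  have hset : PySem.List.pySetD (PySem.List.pySetD zeros 1 1) 2 2
      = (zeros.set 1 1).set 2 2 := by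
    simp [PySem.List.pySetD_of_nonneg]
  set s1 := (zeros.set 1 1).set 2 2 with hs1
  have hlen : s1.length = N + 1 := by simp [hs1, hzl]
  have h1 : PySem.List.pyGetD s1 1 0 = (Nat.fib 2 : Int) := by
    rw [hs1, show (1:Int) = ((1:Nat):Int) by norm_num, PySem.List.pyGetD_natCast,
        List.getD_eq_getElem?_getD, List.getElem?_set_ne (by omega),
        List.getElem?_set_self (by simp [hzl]; omega)]
    decide
  have h2 : PySem.List.pyGetD s1 2 0 = (Nat.fib 3 : Int) := by
    rw [hs1, show (2:Int) = ((2:Nat):Int) by norm_num, PySem.List.pyGetD_natCast,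
        List.getD_eq_getElem?_getD, List.getElem?_set_self (by simp [hzl]; omega)]
    decide
  obtain ⟨_, _, hfin⟩ := loop_inv N s1 hlen h1 h2 (N - 2) (by omega)
  have hub : ((N - 2 : Nat) : Int) + 3 = n + 1 := by push_cast [Nat.cast_sub (by omega : 2 ≤ N)]; omega
  have hidx : ((N - 2 : Nat) : Int) + 2 = n := by push_cast [Nat.cast_sub (by omega : 2 ≤ N)]; omega
  rw [hub, hidx] at hfin
  have hfib : N - 2 + 3 = (n + 1).toNat := by omega
  rw [hfib] at hfin
  simp only [solution, if_neg h]
  rw [hset, hfin, PySem.Int.mod_eq_emod_of_pos (by norm_num)]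

-- ===== VERDICT (by name: the statement is the Claim_ definition above) =====
theorem solution_spec : Claim_equal_solution := by
  intro n _
  unfold Spec_solution solution_alt
  by_cases h : n < 3
  · simp [solution, h]
  · rw [solution_eq_fib n h, fibPair_eq]
    simp [h]
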